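-- pv_equiv track=rewrite | github.com/Vlevinski/Student_Tutor | Python/StudentManagement.py | decodeList
-- ===== SOURCE A (Python) =====
-- def digits_encode(sin):
--     return sin[::-1]
--
-- def decode(strin):
--     return strin
--
-- def decodeList(ilist, olist):
--     for item in ilist:
--         erow = dict()
--         erow["fodselsNummer"] = digits_encode(item["fodselsNummer"])
--         erow["firstName"] = decode(item["firstName"])
--         erow["firstName"] = erow["firstName"].capitalize()
--         erow["lastName"] = decode(item["lastName"])
--         erow["lastName"] = erow["lastName"].capitalize()
--         erow["age"] = digits_encode(item["age"])
--         erow["email"] = decode(item["email"])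
--         erow["programmingCourse"] = decode(item["programmingCourse"])
--         olist.append(erow)
--     return olist
-- ===== SOURCE B (Python) =====
-- def decodeList(ilist, olist):
--     # Columnar: transform each field as a whole column, then zip columns back into rows.
--     cols = [
--         ("fodselsNummer", [item["fodselsNummer"][::-1] for item in ilist]),
--         ("firstName", [item["firstName"].capitalize() for item in ilist]),
--         ("lastName", [item["lastName"].capitalize() for item in ilist]),
--         ("age", [item["age"][::-1] for item in ilist]),
--         ("email", [item["email"] for item in ilist]),
--         ("programmingCourse", [item["programmingCourse"] for item in ilist]),
--     ]
--     keys = [k for k, _ in cols]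
--     for row in zip(*(c for _, c in cols)):
--         olist.append(dict(zip(keys, row)))
--     return olist
-- ===== Notes on version B (the rewrite author's own statement) =====
-- stated objective: alternative
-- what changed: Replaces A's row-by-row dict building (one hard-coded assignment per field per record) by a columnar algorithm: six passes each transform one whole field column, and the six columns are zipped back into records; Pre_ excludes records missing one of the six keys, where A raises KeyError.
import Mathlib
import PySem

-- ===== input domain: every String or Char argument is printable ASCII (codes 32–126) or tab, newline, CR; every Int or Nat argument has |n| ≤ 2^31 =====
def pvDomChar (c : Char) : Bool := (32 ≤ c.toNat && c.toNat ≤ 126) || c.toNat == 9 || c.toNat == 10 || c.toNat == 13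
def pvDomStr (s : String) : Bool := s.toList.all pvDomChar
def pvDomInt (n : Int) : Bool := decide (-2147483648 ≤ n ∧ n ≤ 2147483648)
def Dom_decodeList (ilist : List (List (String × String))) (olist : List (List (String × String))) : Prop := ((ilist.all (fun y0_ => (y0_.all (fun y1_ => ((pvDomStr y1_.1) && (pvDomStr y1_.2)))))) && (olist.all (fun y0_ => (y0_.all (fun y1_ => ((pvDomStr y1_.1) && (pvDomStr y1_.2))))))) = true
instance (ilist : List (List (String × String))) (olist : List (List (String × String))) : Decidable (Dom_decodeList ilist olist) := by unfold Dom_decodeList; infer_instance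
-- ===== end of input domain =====

-- B replaces A's row-wise dict building by a columnar algorithm (transform whole field
-- columns, then zip them back into rows); objective: alternative, not faster.
-- Both Pythons mutate olist in place (append); the equivalence proved is about the return value.

-- ===== PORT A =====

-- item[k]: first-match lookup; returns "" where Python raises KeyError (such inputs are excluded by Pre_)
def pyGetItem (item : List (String × String)) (k : String) : String :=
  match item with
  | [] => ""
  | (k', v) :: rest => if k' == k then v else pyGetItem rest k

-- sin[::-1]
def digits_encode (sin : String) : String :=
  (PySem.Str.slice? sin none none (-1)).getD sin

def decode (strin : String) : String := strin

-- s.capitalize(): first char uppercased, rest lowercased; exact on the ASCII domain (ported by hand, no PySem primitive)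
def pyCapitalize (s : String) : String :=
  match s.toList with
  | [] => s
  | c :: rest => String.ofList (PySem.Chars.upperChar c :: rest.map PySem.Chars.lowerChar)

def decodeList (ilist : List (List (String × String))) (olist : List (List (String × String))) : List (List (String × String)) :=
  match ilist with
  | [] => olist
  | item :: rest =>
      let erow : PySem.Dict String String :=
        ((((((((PySem.Dict.empty.insert "fodselsNummer" (digits_encode (pyGetItem item "fodselsNummer"))).insert
          "firstName" (decode (pyGetItem item "firstName"))).insert
          "firstName" (pyCapitalize (pyGetItem ((PySem.Dict.empty.insert "fodselsNummer" (digits_encode (pyGetItem item "fodselsNummer"))).insert "firstName" (decode (pyGetItem item "firstName"))).items "firstName"))).insert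
          "lastName" (decode (pyGetItem item "lastName"))).insert
          "lastName" (pyCapitalize (decode (pyGetItem item "lastName")))).insert
          "age" (digits_encode (pyGetItem item "age"))).insert
          "email" (decode (pyGetItem item "email"))).insert
          "programmingCourse" (decode (pyGetItem item "programmingCourse")))
      decodeList rest (olist ++ [erow.items])

-- ===== PORT B =====

def bReverse (s : String) : String :=
  (PySem.Str.slice? s none none (-1)).getD s

-- zip of the six transformed columns back into rows (Python's zip truncates at the
-- shortest list; here all six have equal length)
def bZip6 : List String → List String → List String → List String → List String → List String → List (List (String × String))
  | a :: as_, b :: bs, c :: cs, d :: ds, e :: es, f :: fs =>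
      [("fodselsNummer", a), ("firstName", b), ("lastName", c),
       ("age", d), ("email", e), ("programmingCourse", f)] :: bZip6 as_ bs cs ds es fs
  | _, _, _, _, _, _ => []

def decodeList_alt (ilist : List (List (String × String))) (olist : List (List (String × String))) : List (List (String × String)) :=
  let cFnr := ilist.map (fun item => bReverse (pyGetItem item "fodselsNummer"))
  let cFirst := ilist.map (fun item => pyCapitalize (pyGetItem item "firstName"))
  let cLast := ilist.map (fun item => pyCapitalize (pyGetItem item "lastName"))
  let cAge := ilist.map (fun item => bReverse (pyGetItem item "age"))
  let cMail := ilist.map (fun item => pyGetItem item "email")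
  let cCourse := ilist.map (fun item => pyGetItem item "programmingCourse")
  olist ++ bZip6 cFnr cFirst cLast cAge cMail cCourse

-- ===== PRECONDITION & SPEC =====
-- Pre_ excludes exactly the inputs where Python A raises KeyError: every record must contain all six keys.
def Pre_decodeList (ilist : List (List (String × String))) (olist : List (List (String × String))) : Prop :=
  ∀ item ∈ ilist, ∀ k ∈ ["fodselsNummer", "firstName", "lastName", "age", "email", "programmingCourse"],
    k ∈ item.map Prod.fst
instance (ilist : List (List (String × String))) (olist : List (List (String × String))) : Decidable (Pre_decodeList ilist olist) := by unfold Pre_decodeList; infer_instance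

def pvWitness_decodeList : (List (List (String × String))) × (List (List (String × String))) :=
  ([[("fodselsNummer", "123"), ("firstName", "aLiCe"), ("lastName", "mC x"), ("age", "42"), ("email", "a@B"), ("programmingCourse", "pY")]], [[("x", "y")]])

def Spec_decodeList (ilist : List (List (String × String))) (olist : List (List (String × String))) (out : List (List (String × String))) : Prop := out = decodeList_alt ilist olist
instance (ilist : List (List (String × String))) (olist : List (List (String × String))) (out : List (List (String × String))) : Decidable (Spec_decodeList ilist olist out) := by unfold Spec_decodeList; infer_instance

-- ===== CLAIM (what is proved, stated in full; the proofs are below) =====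
def Claim_equal_decodeList : Prop := ∀ (ilist : List (List (String × String))) (olist : List (List (String × String))), Dom_decodeList ilist olist → Pre_decodeList ilist olist → Spec_decodeList ilist olist (decodeList ilist olist)

-- ===== LEMMAS AND PROOFS =====

-- zipping six mapped columns of the same list rebuilds the per-record rows
theorem bZip6_map (ilist : List (List (String × String))) :
    bZip6 (ilist.map (fun item => bReverse (pyGetItem item "fodselsNummer")))
          (ilist.map (fun item => pyCapitalize (pyGetItem item "firstName")))
          (ilist.map (fun item => pyCapitalize (pyGetItem item "lastName")))
          (ilist.map (fun item => bReverse (pyGetItem item "age")))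
          (ilist.map (fun item => pyGetItem item "email"))
          (ilist.map (fun item => pyGetItem item "programmingCourse"))
    = ilist.map (fun item =>
        [("fodselsNummer", bReverse (pyGetItem item "fodselsNummer")),
         ("firstName", pyCapitalize (pyGetItem item "firstName")),
         ("lastName", pyCapitalize (pyGetItem item "lastName")),
         ("age", bReverse (pyGetItem item "age")),
         ("email", pyGetItem item "email"),
         ("programmingCourse", pyGetItem item "programmingCourse")]) := by
  induction ilist with
  | nil => rfl
  | cons item rest ih => simp [bZip6, ih]

-- A's erow.items equals the row B's zip produces for that record
theorem row_eq (item : List (String × String)) :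
    (((((((((PySem.Dict.empty.insert "fodselsNummer" (digits_encode (pyGetItem item "fodselsNummer"))).insert
      "firstName" (decode (pyGetItem item "firstName"))).insert
      "firstName" (pyCapitalize (pyGetItem ((PySem.Dict.empty.insert "fodselsNummer" (digits_encode (pyGetItem item "fodselsNummer"))).insert "firstName" (decode (pyGetItem item "firstName"))).items "firstName"))).insert
      "lastName" (decode (pyGetItem item "lastName"))).insert
      "lastName" (pyCapitalize (decode (pyGetItem item "lastName")))).insert
      "age" (digits_encode (pyGetItem item "age"))).insert
      "email" (decode (pyGetItem item "email"))).insert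
      "programmingCourse" (decode (pyGetItem item "programmingCourse"))) : PySem.Dict String String).items
    = [("fodselsNummer", bReverse (pyGetItem item "fodselsNummer")),
       ("firstName", pyCapitalize (pyGetItem item "firstName")),
       ("lastName", pyCapitalize (pyGetItem item "lastName")),
       ("age", bReverse (pyGetItem item "age")),
       ("email", pyGetItem item "email"),
       ("programmingCourse", pyGetItem item "programmingCourse")] := by
  simp [PySem.Dict.insert, PySem.Dict.empty, decode, pyGetItem, digits_encode, bReverse]

theorem decodeList_eq (ilist olist : List (List (String × String))) :
    decodeList ilist olist = decodeList_alt ilist olist := by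
  induction ilist generalizing olist with
  | nil => simp [decodeList, decodeList_alt, bZip6]
  | cons item rest ih =>
      rw [decodeList, ih]
      simp only [decodeList_alt, bZip6_map, row_eq, List.map_cons]
      simp only [bZip6]
      rw [bZip6_map]
      simp

-- ===== VERDICT (by name: the statement is the Claim_ definition above) =====
theorem decodeList_spec : Claim_equal_decodeList := by
  intro ilist olist _ _
  exact decodeList_eq ilist olist
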